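-- pv_equiv track=rewrite | github.com/seungriyou/algorithm-study | Brute-Force/Bit/BOJ-11578.py | min_student
-- ===== SOURCE A (Python) =====
-- import itertools
-- from typing import List
--
-- def min_student(N: int, M: int, problems: List[int]) -> int:
--     # 1명이 모든 문제를 풀 수 있는 경우
--     if 2 ** N - 1 in problems:
--         return 1
--     # m명이 모든 문제를 풀 수 있는 경우
--     for m in range(2, M + 1):
--         for comb in itertools.combinations(problems, m):
--             result = 0
--             for c in comb:
--                 result |= c
--             if result == 2 ** N - 1:
--                 return m
--     # 모든 학생이 풀어도 모든 문제를 풀 수 없는 경우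
--     return -1
-- ===== SOURCE B (Python) =====
-- def min_student(N, M, problems):
--     full = 2 ** N - 1
--     masks = set(problems)
--     if full in masks:
--         return 1
--     reach = set(masks)
--     for m in range(2, M + 1):
--         new = {r | p for r in reach for p in masks} - reach
--         if not new:
--             return -1
--         if full in new:
--             return m
--         reach |= new
--     return -1
-- ===== Notes on version B (the rewrite author's own statement) =====
-- stated objective: faster
-- what changed: A enumerates all size-m combinations of the masks (exponential in M); B runs a BFS over the set of reachable OR-coverage bitmasks, one level per additional student, stopping early at a fixpoint.
import Mathlib
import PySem

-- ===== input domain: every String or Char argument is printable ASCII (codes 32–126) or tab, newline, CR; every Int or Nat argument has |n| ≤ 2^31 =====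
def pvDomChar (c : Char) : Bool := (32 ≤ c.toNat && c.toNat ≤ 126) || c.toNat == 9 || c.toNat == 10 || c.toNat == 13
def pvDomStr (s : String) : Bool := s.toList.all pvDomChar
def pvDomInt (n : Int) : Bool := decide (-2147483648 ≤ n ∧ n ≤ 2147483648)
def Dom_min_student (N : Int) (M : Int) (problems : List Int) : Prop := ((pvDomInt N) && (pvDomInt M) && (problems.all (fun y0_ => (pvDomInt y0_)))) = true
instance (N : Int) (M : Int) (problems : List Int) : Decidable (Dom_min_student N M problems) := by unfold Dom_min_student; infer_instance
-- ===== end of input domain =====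

-- B replaces A's search over all size-m combinations of `problems` (exponential in M) by a BFS
-- over the set of reachable OR-coverage bitmasks, one level per student count, stopping at a
-- fixpoint; same return value everywhere (objective: faster; measured so in a timing run).

-- ===== PORT A =====
-- itertools.combinations(xs, m), in itertools' order
def pvCombs : Nat → List Int → List (List Int)
  | 0, _ => [[]]
  | _ + 1, [] => []
  | m + 1, x :: xs => (pvCombs m xs).map (fun c => x :: c) ++ pvCombs (m + 1) xs

-- `for m in range(2, M+1): for comb in combinations(problems, m): …` with early return.
-- `ok` carries whether 2**N-1 is an integer (see min_student below); `ok = false` makes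
-- every equality test with the float target false, exactly as in Python.
def pvALoop (full : Int) (ok : Bool) (problems : List Int) : Nat → Int → Int
  | 0, _ => -1
  | fuel + 1, m =>
    if (pvCombs m.toNat problems).any
        (fun comb => ok && decide (comb.foldl (fun r c => PySem.Int.bor r c) 0 = full)) then m
    else pvALoop full ok problems fuel (m + 1)

def min_student (N : Int) (M : Int) (problems : List Int) : Int :=
  -- exactness: for N < 0 Python's `2 ** N - 1` is a float: exactly -1.0 when N ≤ -54 (underflow
  -- below half an ulp of 1), hence equal to the int -1; non-integer for -53 ≤ N < 0, hence equal
  -- to no int (modelled by ok = false: all equality tests false).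
  let ok : Bool := decide (0 ≤ N ∨ N ≤ -54)
  let full : Int := if 0 ≤ N then 2 ^ N.toNat - 1 else -1
  if ok && problems.contains full then 1
  else pvALoop full ok problems (M - 1).toNat 2   -- range(2, M+1) is lazy: max(0, M-1) steps from m = 2

-- ===== PORT B =====
-- {r | p for r in reach for p in masks}  (a set; element order never observed)
def pvCompr (reach masks : PySem.Set Int) : PySem.Set Int :=
  reach.foldl
    (fun acc r => masks.foldl (fun acc2 p => PySem.Set.add acc2 (PySem.Int.bor r p)) acc)
    PySem.Set.empty

-- `for m in range(2, M+1): new = {...} - reach; if not new: return -1; if full in new: return m; reach |= new`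
def pvBLoop (full : Int) (ok : Bool) (masks : PySem.Set Int) : Nat → Int → PySem.Set Int → Int
  | 0, _, _ => -1
  | fuel + 1, m, reach =>
    let new := PySem.Set.diff (pvCompr reach masks) reach
    if new.isEmpty then -1
    else if ok && PySem.Set.contains new full then m
    else pvBLoop full ok masks fuel (m + 1) (PySem.Set.union reach new)

def min_student_alt (N : Int) (M : Int) (problems : List Int) : Int :=
  -- same float note as in min_student: full = -1 for N ≤ -54, ok = false for -53 ≤ N < 0
  let ok : Bool := decide (0 ≤ N ∨ N ≤ -54)
  let full : Int := if 0 ≤ N then 2 ^ N.toNat - 1 else -1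
  let masks := PySem.Set.ofList problems
  if ok && PySem.Set.contains masks full then 1
  else pvBLoop full ok masks (M - 1).toNat 2 masks   -- same lazy range(2, M+1)

-- ===== PRECONDITION & SPEC =====
def Spec_min_student (N : Int) (M : Int) (problems : List Int) (out : Int) : Prop := out = min_student_alt N M problems
instance (N : Int) (M : Int) (problems : List Int) (out : Int) : Decidable (Spec_min_student N M problems out) := by unfold Spec_min_student; infer_instance

-- ===== CLAIM (what is proved, stated in full; the proofs are below) =====
def Claim_equal_min_student : Prop := ∀ (N : Int) (M : Int) (problems : List Int), Dom_min_student N M problems → Spec_min_student N M problems (min_student N M problems)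

-- ===== LEMMAS AND PROOFS =====

-- ---- bitwise-or algebra (not available for PySem.Int.bor / Int.lor in the library) ----
theorem pv_ldiff_eq_sub (a : Nat) : ∀ b : Nat, Nat.ldiff a b = a - (a &&& b) := by
  induction a using Nat.binaryRec with
  | zero => intro b; simp [Nat.ldiff]
  | bit xa m ih =>
    intro b
    induction b using Nat.binaryRec with
    | zero => simp [Nat.ldiff]
    | bit xb n _ =>
      rw [Nat.ldiff_bit, Nat.land_bit, ih n]
      have hle : m &&& n ≤ m := Nat.and_le_left
      cases xa <;> cases xb <;> simp [Nat.bit_val] <;> omega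

theorem pv_bor_eq_lor (a b : Int) : PySem.Int.bor a b = Int.lor a b := by
  rcases a with a | a <;> rcases b with b | b <;>
    simp [PySem.Int.bor, Int.lor, Int.negSucc_eq, pv_ldiff_eq_sub] <;> omega

theorem pv_testBit_high (m n : Nat) : m.testBit (m + n) = false :=
  Nat.testBit_eq_false_of_lt (lt_of_le_of_lt (Nat.le_add_right m n) Nat.lt_two_pow_self)

theorem pv_int_testBit_ext {m n : Int} (h : ∀ i, m.testBit i = n.testBit i) : m = n := by
  rcases m with m | m <;> rcases n with n | n
  · exact congrArg Int.ofNat (Nat.eq_of_testBit_eq fun i => h i)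
  · have h2 := h (m + n)
    rw [show Int.testBit (Int.ofNat m) (m + n) = m.testBit (m + n) from rfl,
        show Int.testBit (Int.negSucc n) (m + n) = !n.testBit (m + n) from rfl,
        pv_testBit_high] at h2
    rw [show m + n = n + m from Nat.add_comm m n, pv_testBit_high] at h2
    exact absurd h2 (by simp)
  · have h2 := h (m + n)
    rw [show Int.testBit (Int.negSucc m) (m + n) = !m.testBit (m + n) from rfl,
        show Int.testBit (Int.ofNat n) (m + n) = n.testBit (m + n) from rfl,
        pv_testBit_high] at h2
    rw [show m + n = n + m from Nat.add_comm m n, pv_testBit_high] at h2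
    exact absurd h2 (by simp)
  · have h' : ∀ i, m.testBit i = n.testBit i := fun i => by
      have := h i; simpa [Int.testBit] using this
    exact congrArg Int.negSucc (Nat.eq_of_testBit_eq h')

theorem pv_testBit_bor (a b : Int) (i : Nat) :
    (PySem.Int.bor a b).testBit i = (a.testBit i || b.testBit i) := by
  rw [pv_bor_eq_lor]; exact Int.testBit_lor a b i

theorem pv_bor_assoc (a b c : Int) :
    PySem.Int.bor (PySem.Int.bor a b) c = PySem.Int.bor a (PySem.Int.bor b c) := by
  apply pv_int_testBit_ext; intro i
  simp [pv_testBit_bor, Bool.or_assoc]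

theorem pv_zero_bor (a : Int) : PySem.Int.bor 0 a = a := by
  rw [PySem.Int.bor_comm]; exact PySem.Int.bor_zero a

-- ---- OR of a list ----
def pvOrL (l : List Int) : Int := l.foldl (fun r c => PySem.Int.bor r c) 0

theorem pv_foldl_bor (l : List Int) : ∀ s : Int,
    l.foldl (fun r c => PySem.Int.bor r c) s = PySem.Int.bor s (pvOrL l) := by
  induction l with
  | nil => intro s; simp [pvOrL, PySem.Int.bor_zero]
  | cons c l ih =>
    intro s
    have hc : pvOrL (c :: l) = PySem.Int.bor c (pvOrL l) := by
      show l.foldl _ (PySem.Int.bor 0 c) = _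
      rw [pv_zero_bor, ih c]
    rw [List.foldl_cons, ih (PySem.Int.bor s c), hc, pv_bor_assoc]

theorem pv_orL_cons (c : Int) (l : List Int) : pvOrL (c :: l) = PySem.Int.bor c (pvOrL l) := by
  simp only [pvOrL, List.foldl_cons, pv_zero_bor]
  exact pv_foldl_bor l c

theorem pv_orL_append_singleton (l : List Int) (p : Int) :
    pvOrL (l ++ [p]) = PySem.Int.bor (pvOrL l) p := by
  simp only [pvOrL, List.foldl_append, List.foldl_cons, List.foldl_nil]

theorem pv_orL_singleton (a : Int) : pvOrL [a] = a := by
  simp [pvOrL, pv_zero_bor]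

-- ---- subset-OR predicates ----
def pvSub (problems : List Int) (k : Nat) (x : Int) : Prop :=
  ∃ l : List Int, l.Sublist problems ∧ l.length = k ∧ pvOrL l = x

def pvSubLe (problems : List Int) (j : Nat) (x : Int) : Prop :=
  ∃ k, 1 ≤ k ∧ k ≤ j ∧ pvSub problems k x

theorem pv_mem_combs (m : Nat) (xs : List Int) (l : List Int) :
    l ∈ pvCombs m xs ↔ l.Sublist xs ∧ l.length = m := by
  induction xs generalizing m l with
  | nil =>
    cases m with
    | zero =>
      simp only [pvCombs, List.mem_singleton]
      constructor
      · rintro rfl; exact ⟨List.Sublist.refl _, rfl⟩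
      · rintro ⟨hs, hl⟩; exact List.eq_nil_of_length_eq_zero hl
    | succ m =>
      simp only [pvCombs, List.not_mem_nil, false_iff]
      rintro ⟨hs, hl⟩
      have := List.sublist_nil.mp hs
      subst this; simp at hl
  | cons x xs ih =>
    cases m with
    | zero =>
      simp only [pvCombs, List.mem_singleton]
      constructor
      · rintro rfl; exact ⟨List.nil_sublist _, rfl⟩
      · rintro ⟨_, hl⟩; exact List.eq_nil_of_length_eq_zero hl
    | succ m =>
      simp only [pvCombs, List.mem_append, List.mem_map]
      constructor
      · rintro (⟨c, hc, rfl⟩ | h)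
        · have := (ih m c).mp hc
          exact ⟨List.Sublist.cons₂ x this.1, by simp [this.2]⟩
        · have := (ih (m + 1) l).mp h
          exact ⟨List.Sublist.cons x this.1, this.2⟩
      · rintro ⟨hs, hl⟩
        cases hs with
        | cons _ h => exact Or.inr ((ih (m + 1) l).mpr ⟨h, hl⟩)
        | cons₂ _ h =>
          exact Or.inl ⟨_, (ih m _).mpr ⟨h, by simpa using hl⟩, rfl⟩

-- a ∈ l → OR l ∪ {a} = OR l
theorem pv_bor_orL_mem {a : Int} {l : List Int} (h : a ∈ l) :
    PySem.Int.bor (pvOrL l) a = pvOrL l := by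
  induction l with
  | nil => simp at h
  | cons b l ih =>
    rw [pv_orL_cons]
    rcases List.mem_cons.mp h with rfl | h
    · apply pv_int_testBit_ext; intro i
      simp only [pv_testBit_bor]
      cases Int.testBit a i <;> simp
    · rw [pv_bor_assoc, ih h]

-- extend a sublist by one more element of L, OR-wise
theorem pv_sub_extend {a : Int} : ∀ {L l1 : List Int}, l1.Sublist L → a ∈ L →
    1 ≤ l1.length →
    ∃ l2 : List Int, l2.Sublist L ∧ 1 ≤ l2.length ∧ l2.length ≤ l1.length + 1 ∧
      pvOrL l2 = PySem.Int.bor (pvOrL l1) a := by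
  intro L
  induction L with
  | nil => intro l1 _ ha; simp at ha
  | cons hd tl ih =>
    intro l1 hs ha hne
    cases hs with
    | cons _ h =>
      by_cases hah : a = hd
      · subst hah
        exact ⟨a :: l1, List.Sublist.cons₂ a h, by simp, by simp,
          by rw [pv_orL_cons, PySem.Int.bor_comm]⟩
      · have haL : a ∈ tl := by
          rcases List.mem_cons.mp ha with h' | h'
          · exact absurd h' hah
          · exact h'
        obtain ⟨l2, h1, h2, h3, h4⟩ := ih h haL hne
        exact ⟨l2, List.Sublist.cons hd h1, h2, h3, h4⟩
    | @cons₂ t _ _ h =>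
      by_cases hah : a = hd
      · subst hah
        refine ⟨a :: t, List.Sublist.cons₂ a h, by simp, by simp, ?_⟩
        rw [pv_bor_orL_mem List.mem_cons_self]
      · have haL : a ∈ tl := by
          rcases List.mem_cons.mp ha with h' | h'
          · exact absurd h' hah
          · exact h'
        rcases Nat.eq_zero_or_pos t.length with hz | hpos
        · have ht : t = [] := List.eq_nil_of_length_eq_zero hz
          subst ht
          refine ⟨hd :: [a], List.Sublist.cons₂ hd (List.singleton_sublist.mpr haL), by simp,
            by simp, ?_⟩
          rw [pv_orL_cons, pv_orL_singleton, pv_orL_singleton]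
        · obtain ⟨l2, h1, h2, h3, h4⟩ := ih h haL hpos
          refine ⟨hd :: l2, List.Sublist.cons₂ hd h1, by simp, by simpa using h3, ?_⟩
          rw [pv_orL_cons, pv_orL_cons, h4, pv_bor_assoc]

-- peel the last element off a (k+1)-sized witness
theorem pv_sub_peel {problems : List Int} {k : Nat} {x : Int}
    (h : pvSub problems (k + 1) x) (_hk : 1 ≤ k) :
    ∃ r p, pvSub problems k r ∧ p ∈ problems ∧ x = PySem.Int.bor r p := by
  obtain ⟨l, hs, hl, ho⟩ := h
  have hne : l ≠ [] := by intro h; subst h; simp at hl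
  refine ⟨pvOrL l.dropLast, l.getLast hne, ⟨l.dropLast, ?_, ?_, rfl⟩, ?_, ?_⟩
  · exact (List.dropLast_sublist l).trans hs
  · simp [List.length_dropLast, hl]
  · exact hs.mem (List.getLast_mem hne)
  · rw [← ho, ← pv_orL_append_singleton, List.dropLast_append_getLast hne]

-- membership in the comprehension set
theorem pv_mem_compr_aux (masks : PySem.Set Int) (x : Int) :
    ∀ (L : List Int) (acc : PySem.Set Int),
      (x ∈ L.foldl
        (fun acc r => masks.foldl (fun acc2 p => PySem.Set.add acc2 (PySem.Int.bor r p)) acc)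
        acc
       ↔ x ∈ acc ∨ ∃ r ∈ L, ∃ p ∈ masks, x = PySem.Int.bor r p) := by
  have inner : ∀ (r : Int) (P : List Int) (acc : PySem.Set Int),
      (x ∈ P.foldl (fun acc2 p => PySem.Set.add acc2 (PySem.Int.bor r p)) acc
       ↔ x ∈ acc ∨ ∃ p ∈ P, x = PySem.Int.bor r p) := by
    intro r P
    induction P with
    | nil => intro acc; simp
    | cons p P ih =>
      intro acc
      simp only [List.foldl_cons, ih, PySem.Set.mem_add]
      constructor
      · rintro ((h | h) | h)
        · exact Or.inl h
        · exact Or.inr ⟨p, by simp, h⟩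
        · obtain ⟨q, hq, rfl⟩ := h; exact Or.inr ⟨q, by simp [hq], rfl⟩
      · rintro (h | ⟨q, hq, rfl⟩)
        · exact Or.inl (Or.inl h)
        · rcases List.mem_cons.mp hq with rfl | hq
          · exact Or.inl (Or.inr rfl)
          · exact Or.inr ⟨q, hq, rfl⟩
  intro L
  induction L with
  | nil => intro acc; simp
  | cons r L ih =>
    intro acc
    simp only [List.foldl_cons, ih, inner]
    constructor
    · rintro ((h | ⟨p, hp, rfl⟩) | ⟨q, hq, p, hp, rfl⟩)
      · exact Or.inl h
      · exact Or.inr ⟨r, by simp, p, hp, rfl⟩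
      · exact Or.inr ⟨q, by simp [hq], p, hp, rfl⟩
    · rintro (h | ⟨q, hq, p, hp, rfl⟩)
      · exact Or.inl (Or.inl h)
      · rcases List.mem_cons.mp hq with rfl | hq
        · exact Or.inl (Or.inr ⟨p, hp, rfl⟩)
        · exact Or.inr ⟨q, hq, p, hp, rfl⟩

theorem pv_mem_compr (reach masks : PySem.Set Int) (x : Int) :
    x ∈ pvCompr reach masks ↔ ∃ r ∈ reach, ∃ p ∈ masks, x = PySem.Int.bor r p := by
  have := pv_mem_compr_aux masks x reach PySem.Set.empty
  simpa [pvCompr, PySem.Set.empty] using this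

-- closure: if the comprehension adds nothing new, every nonempty subset-OR is already in reach
theorem pv_closure {problems : List Int} {R : PySem.Set Int} {j : Nat} (hj : 1 ≤ j)
    (hinv : ∀ x, x ∈ R ↔ pvSubLe problems j x)
    (hclosed : ∀ r ∈ R, ∀ p ∈ problems, PySem.Int.bor r p ∈ R) :
    ∀ k, 1 ≤ k → ∀ x, pvSub problems k x → x ∈ R := by
  intro k
  induction k with
  | zero => omega
  | succ k ih =>
    intro _ x hx
    rcases Nat.eq_zero_or_pos k with rfl | hk
    · obtain ⟨l, hs, hl, ho⟩ := hx
      rcases l with _ | ⟨a, l⟩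
      · simp at hl
      · have : l = [] := by simpa using hl
        subst this
        rw [(hinv x)]
        exact ⟨1, le_refl 1, hj, [a], hs, rfl, ho⟩
    · obtain ⟨r, p, hr, hp, rfl⟩ := pv_sub_peel hx hk
      exact hclosed r (ih hk r hr) p hp

-- A's loop returns -1 when no combination of any positive size can cover `full`
theorem pv_aLoop_neg (full : Int) (problems : List Int) :
    ∀ (fuel : Nat) (m : Int), 1 ≤ m →
      (∀ k, 1 ≤ k → ¬ pvSub problems k full) →
      pvALoop full true problems fuel m = -1 := by
  intro fuel
  induction fuel with
  | zero => intro m _ _; rfl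
  | succ fuel ih =>
    intro m hm h
    rw [pvALoop]
    rw [if_neg, ih (m + 1) (by omega) h]
    simp only [List.any_eq_true, Bool.true_and, decide_eq_true_eq]
    rintro ⟨c, hc, hor⟩
    obtain ⟨hs, hl⟩ := (pv_mem_combs m.toNat problems c).mp hc
    exact h m.toNat (by omega) ⟨c, hs, hl, hor⟩

-- B's loop with ok = false always returns -1
theorem pv_bLoop_false (full : Int) (masks : PySem.Set Int) :
    ∀ (fuel : Nat) (m : Int) (R : PySem.Set Int), pvBLoop full false masks fuel m R = -1 := by
  intro fuel
  induction fuel with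
  | zero => intro m R; rfl
  | succ fuel ih =>
    intro m R
    rw [pvBLoop]
    simp only [Bool.false_and]
    split <;> [rfl; exact ih _ _]

-- A's loop with ok = false always returns -1
theorem pv_aLoop_false (full : Int) (problems : List Int) :
    ∀ (fuel : Nat) (m : Int), pvALoop full false problems fuel m = -1 := by
  intro fuel
  induction fuel with
  | zero => intro m; rfl
  | succ fuel ih =>
    intro m
    rw [pvALoop]
    simp only [Bool.false_and, List.any_eq_true]
    rw [if_neg (by simp), ih]

theorem pv_contains_ofList (problems : List Int) (x : Int) :
    PySem.Set.contains (PySem.Set.ofList problems) x = true ↔ x ∈ problems := by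
  rw [show PySem.Set.contains (PySem.Set.ofList problems) x
        = List.contains (PySem.Set.ofList problems) x from rfl]
  rw [List.contains_iff_mem, PySem.Set.mem_ofList]

theorem pv_sub_one (problems : List Int) (x : Int) : pvSub problems 1 x ↔ x ∈ problems := by
  constructor
  · rintro ⟨l, hs, hl, ho⟩
    obtain ⟨a, rfl⟩ := List.length_eq_one_iff.mp hl
    rw [pv_orL_singleton] at ho
    subst ho
    exact List.singleton_sublist.mp hs
  · intro hx
    exact ⟨[x], List.singleton_sublist.mpr hx, rfl, pv_orL_singleton x⟩

-- the main loop invariant: one level of B's BFS corresponds to one combination size of A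
theorem pv_loop_eq (full : Int) (problems : List Int) :
    ∀ (fuel : Nat) (j : Nat) (R : PySem.Set Int),
      1 ≤ j →
      (∀ x, x ∈ R ↔ pvSubLe problems j x) →
      full ∉ R →
      pvALoop full true problems fuel ((j : Int) + 1)
        = pvBLoop full true (PySem.Set.ofList problems) fuel ((j : Int) + 1) R := by
  intro fuel
  induction fuel with
  | zero => intro j R _ _ _; rfl
  | succ fuel ih =>
    intro j R hj hinv hfull
    have hmt : ((j : Int) + 1).toNat = j + 1 := by omega
    -- membership facts
    have hC : ∀ x, x ∈ pvCompr R (PySem.Set.ofList problems) ↔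
        ∃ r ∈ R, ∃ p ∈ problems, x = PySem.Int.bor r p := by
      intro x
      rw [pv_mem_compr]
      constructor
      · rintro ⟨r, hr, p, hp, rfl⟩
        exact ⟨r, hr, p, (PySem.Set.mem_ofList problems p).mp hp, rfl⟩
      · rintro ⟨r, hr, p, hp, rfl⟩
        exact ⟨r, hr, p, (PySem.Set.mem_ofList problems p).mpr hp, rfl⟩
    have hC_sub : ∀ x, x ∈ pvCompr R (PySem.Set.ofList problems) → pvSubLe problems (j + 1) x := by
      intro x hx
      obtain ⟨r, hr, p, hp, rfl⟩ := (hC x).mp hx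
      obtain ⟨k, hk1, hkj, l1, hls, hll, hlo⟩ := (hinv r).mp hr
      obtain ⟨l2, h1, h2, h3, h4⟩ := pv_sub_extend hls hp (by omega)
      exact ⟨l2.length, h2, by omega, l2, h1, rfl, by rw [h4, hlo]⟩
    have hsub_C : ∀ x, pvSub problems (j + 1) x → x ∈ pvCompr R (PySem.Set.ofList problems) := by
      intro x hx
      obtain ⟨r, p, hr, hp, rfl⟩ := pv_sub_peel hx hj
      exact (hC _).mpr ⟨r, (hinv r).mpr ⟨j, hj, le_refl j, hr⟩, p, hp, rfl⟩
    -- A's condition at this level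
    have hcond : ((pvCombs ((j : Int) + 1).toNat problems).any
        (fun comb => true && decide (comb.foldl (fun r c => PySem.Int.bor r c) 0 = full))) = true
        ↔ pvSub problems (j + 1) full := by
      rw [List.any_eq_true]
      constructor
      · rintro ⟨c, hc, hor⟩
        simp only [Bool.true_and, decide_eq_true_eq] at hor
        obtain ⟨hs, hl⟩ := (pv_mem_combs _ problems c).mp hc
        exact ⟨c, hs, by omega, hor⟩
      · rintro ⟨l, hs, hl, ho⟩
        exact ⟨l, (pv_mem_combs _ problems l).mpr ⟨hs, by omega⟩,
          by simp only [Bool.true_and, decide_eq_true_eq]; exact ho⟩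
    by_cases hempty : (PySem.Set.diff (pvCompr R (PySem.Set.ofList problems)) R).isEmpty = true
    · -- fixpoint: nothing new can ever appear, both sides end in -1
      have hnil : PySem.Set.diff (pvCompr R (PySem.Set.ofList problems)) R = [] :=
        List.isEmpty_iff.mp hempty
      have hclosed : ∀ r ∈ R, ∀ p ∈ problems, PySem.Int.bor r p ∈ R := by
        intro r hr p hp
        by_contra hnot
        have : PySem.Int.bor r p ∈ PySem.Set.diff (pvCompr R (PySem.Set.ofList problems)) R :=
          (PySem.Set.mem_diff _ _ _).mpr ⟨(hC _).mpr ⟨r, hr, p, hp, rfl⟩, hnot⟩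
        rw [hnil] at this
        exact List.not_mem_nil this
      have hall := pv_closure hj hinv hclosed
      have hB : pvBLoop full true (PySem.Set.ofList problems) (fuel + 1) ((j : Int) + 1) R
          = -1 := by
        rw [pvBLoop]
        simp only [hempty, if_true]
      rw [hB]
      apply pv_aLoop_neg full problems (fuel + 1) ((j : Int) + 1) (by omega)
      intro k hk hsub
      exact hfull (hall k hk full hsub)
    · by_cases hfnew : full ∈ PySem.Set.diff (pvCompr R (PySem.Set.ofList problems)) R
      · -- found at this level: both return the current m
        have hfsub : pvSub problems (j + 1) full := by
          obtain ⟨hfC, hfR⟩ := (PySem.Set.mem_diff _ _ _).mp hfnew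
          obtain ⟨k, hk1, hkj, hsk⟩ := hC_sub full hfC
          have hkj1 : k = j + 1 := by
            by_contra hne
            exact hfull ((hinv full).mpr ⟨k, hk1, by omega, hsk⟩)
          rw [← hkj1]; exact hsk
        have hcont : PySem.Set.contains ((pvCompr R (PySem.Set.ofList problems)).diff R) full
            = true := by
          rw [show ∀ (s : PySem.Set Int) (x : Int), PySem.Set.contains s x = List.contains s x
                from fun _ _ => rfl]
          exact List.contains_iff_mem.mpr hfnew
        have hcondA := hcond.mpr hfsub
        rw [pvALoop, pvBLoop]
        simp only [Bool.true_and] at hcondA ⊢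
        simp only [hempty, hcondA, hcont, Bool.false_eq_true, if_false, if_true]
      · -- not found at this level: both recurse
        have hnofull : ¬ pvSub problems (j + 1) full := by
          intro hsub
          have hfC := hsub_C full hsub
          exact hfnew ((PySem.Set.mem_diff _ _ _).mpr ⟨hfC, hfull⟩)
        have hcont : PySem.Set.contains ((pvCompr R (PySem.Set.ofList problems)).diff R) full
            = false := by
          rw [show ∀ (s : PySem.Set Int) (x : Int), PySem.Set.contains s x = List.contains s x
                from fun _ _ => rfl]
          exact Bool.eq_false_iff.mpr (fun h => hfnew (List.contains_iff_mem.mp h))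
        have hcondA : ((pvCombs ((j : Int) + 1).toNat problems).any
            (fun comb => true && decide (comb.foldl (fun r c => PySem.Int.bor r c) 0 = full)))
            = false := Bool.eq_false_iff.mpr (fun h => hnofull (hcond.mp h))
        rw [pvALoop, pvBLoop]
        simp only [Bool.true_and] at hcondA ⊢
        simp only [hempty, hcondA, hcont, Bool.false_eq_true, if_false]
        have hstep : ((j : Int) + 1) + 1 = ((j + 1 : Nat) : Int) + 1 := by push_cast; ring
        rw [hstep]
        apply ih (j + 1)
        · omega
        · intro x
          rw [PySem.Set.mem_union]
          constructor
          · rintro (hx | hx)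
            · obtain ⟨k, h1, h2, h3⟩ := (hinv x).mp hx
              exact ⟨k, h1, by omega, h3⟩
            · obtain ⟨hxC, _⟩ := (PySem.Set.mem_diff _ _ _).mp hx
              exact hC_sub x hxC
          · rintro ⟨k, h1, h2, h3⟩
            rcases Nat.lt_or_ge k (j + 1) with hklt | hk
            · exact Or.inl ((hinv x).mpr ⟨k, h1, by omega, h3⟩)
            · have hkj1 : k = j + 1 := by omega
              subst hkj1
              have hxC := hsub_C x h3
              by_cases hxR : x ∈ R
              · exact Or.inl hxR
              · exact Or.inr ((PySem.Set.mem_diff _ _ _).mpr ⟨hxC, hxR⟩)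
        · rw [PySem.Set.mem_union]
          rintro (h | h)
          · exact hfull h
          · exact hfnew h

-- ===== VERDICT (by name: the statement is the Claim_ definition above) =====
theorem min_student_spec : Claim_equal_min_student := by
  intro N M problems _
  unfold Spec_min_student min_student min_student_alt
  simp only
  by_cases hN : (0 ≤ N ∨ N ≤ -54)
  · simp only [decide_eq_true hN, Bool.true_and]
    by_cases hmem : (if 0 ≤ N then 2 ^ N.toNat - 1 else -1 : Int) ∈ problems
    · rw [if_pos (List.contains_iff_mem.mpr hmem),
        if_pos ((pv_contains_ofList problems _).mpr hmem)]
    · rw [if_neg (fun h => hmem (List.contains_iff_mem.mp h)),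
        if_neg (fun h => hmem ((pv_contains_ofList problems _).mp h))]
      have h2 : ((1 : Nat) : Int) + 1 = 2 := by norm_num
      rw [← h2]
      apply pv_loop_eq
      · exact le_refl 1
      · intro x
        rw [PySem.Set.mem_ofList]
        constructor
        · intro hx
          exact ⟨1, le_refl 1, le_refl 1, (pv_sub_one problems x).mpr hx⟩
        · rintro ⟨k, hk1, hk2, hs⟩
          have : k = 1 := by omega
          subst this
          exact (pv_sub_one problems x).mp hs
      · rw [PySem.Set.mem_ofList]
        exact hmem
  · simp only [decide_eq_false hN, Bool.false_and, Bool.false_eq_true, if_false]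
    rw [pv_aLoop_false, pv_bLoop_false]
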